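-- pv_equiv track=rewrite | github.com/LCOGT/mop | mop/management/commands/merge_utils.py | merge_obs_mode
-- ===== SOURCE A (Python) =====
-- def merge_obs_mode(primary_value, matching_values):
--     """
--         Targets under active observation should always be prioritized.
--         This function checks through a list of the possible observation mode values
--         in order of the urgency of those modes.
--
--         Inputs:
--             primary_value str           Alive extra_param for primary Target
--             matching_values list, str    Alive extra_param values for matching Targets
--
--         Returns:
--             new_value  str              New Observing_mode status
--     """
--
--     priority_list = [
--         'priority_stellar_event',
--         'priority_long_event',
--         'regular_long_event'
--     ]
--
--     for mode in priority_list: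
--         # If the primary target already has this observation mode set,
--         # this takes priority
--         if primary_value == mode:
--             return mode
--
--         # If not, check to see if any of the matching targets have this priority
--         # If they do, use this observation mode
--         for obs_mode in matching_values:
--             if obs_mode == mode:
--                 return obs_mode
--
--     # If we get to this point without returning, neither the primary target
--     # nor any matching targets had a valid observing mode
--     return 'No'
-- ===== SOURCE B (Python) =====
-- def merge_obs_mode(primary_value, matching_values):
--     """Pick the highest-priority observation mode among the primary value and
--     all matching values by gathering candidate priority indices and taking the
--     minimum, instead of scanning the priority list with nested short-circuits."""
--     priority_list = [
--         'priority_stellar_event',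
--         'priority_long_event',
--         'regular_long_event'
--     ]
--     idxs = [priority_list.index(c)
--             for c in [primary_value] + list(matching_values)
--             if c in priority_list]
--     best = min(idxs, default=None)
--     return priority_list[best] if best is not None else 'No'
-- ===== Notes on version B (the rewrite author's own statement) =====
-- stated objective: alternative
-- what changed: Replaced the priority-ordered short-circuit scan (outer loop over modes, inner loop over matching values) by a gather-then-pick pass: build all candidates, map each to its priority index, and return the mode at the minimum index (or 'No' if none).
import Mathlib
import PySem

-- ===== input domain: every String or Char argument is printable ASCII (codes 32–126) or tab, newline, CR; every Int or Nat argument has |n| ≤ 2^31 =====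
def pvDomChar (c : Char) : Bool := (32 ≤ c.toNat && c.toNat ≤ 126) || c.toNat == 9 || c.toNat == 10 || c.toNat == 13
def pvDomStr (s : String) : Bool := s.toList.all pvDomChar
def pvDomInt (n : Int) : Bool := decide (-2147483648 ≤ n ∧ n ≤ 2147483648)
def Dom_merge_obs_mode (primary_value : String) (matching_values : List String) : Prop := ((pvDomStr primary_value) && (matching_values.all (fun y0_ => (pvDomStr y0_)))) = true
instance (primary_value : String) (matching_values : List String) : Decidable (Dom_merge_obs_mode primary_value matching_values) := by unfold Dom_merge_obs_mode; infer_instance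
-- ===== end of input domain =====

-- B replaces A's priority-ordered short-circuit scan by a gather-candidates-then-minimum-index pass (alternative decomposition, same cost).

-- ===== PORT A =====
-- inner loop: 'for obs_mode in matching_values: if obs_mode == mode: return obs_mode'
def pvInnerA (matching_values : List String) (mode : String) : Option String :=
  match matching_values with
  | [] => none
  | obs_mode :: rest => if obs_mode = mode then some obs_mode else pvInnerA rest mode

-- outer loop: 'for mode in priority_list: …'
def pvLoopA (primary_value : String) (matching_values : List String) : List String → String
  | [] => "No"
  | mode :: rest =>
    if primary_value = mode then mode
    else
      match pvInnerA matching_values mode with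
      | some obs_mode => obs_mode
      | none => pvLoopA primary_value matching_values rest

def merge_obs_mode (primary_value : String) (matching_values : List String) : String :=
  pvLoopA primary_value matching_values
    ["priority_stellar_event", "priority_long_event", "regular_long_event"]

-- ===== PORT B =====
def pvPriorityB : List String :=
  ["priority_stellar_event", "priority_long_event", "regular_long_event"]

def merge_obs_mode_alt (primary_value : String) (matching_values : List String) : String :=
  let idxs := (primary_value :: matching_values).filterMap
    (fun c => PySem.List.index? pvPriorityB c)
  match PySem.List.min? idxs (fun x => x) with
  | some best => (pvPriorityB[best]?).getD "No"   -- getD: index is always in range here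
  | none => "No"

-- ===== PRECONDITION & SPEC =====
def Spec_merge_obs_mode (primary_value : String) (matching_values : List String) (out : String) : Prop := out = merge_obs_mode_alt primary_value matching_values
instance (primary_value : String) (matching_values : List String) (out : String) : Decidable (Spec_merge_obs_mode primary_value matching_values out) := by unfold Spec_merge_obs_mode; infer_instance

-- ===== CLAIM (what is proved, stated in full; the proofs are below) =====
def Claim_equal_merge_obs_mode : Prop := ∀ (primary_value : String) (matching_values : List String), Dom_merge_obs_mode primary_value matching_values → Spec_merge_obs_mode primary_value matching_values (merge_obs_mode primary_value matching_values)

-- ===== LEMMAS AND PROOFS =====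

lemma pvInnerA_eq (ms : List String) (mode : String) :
    pvInnerA ms mode = if mode ∈ ms then some mode else none := by
  induction ms with
  | nil => simp [pvInnerA]
  | cons o rest ih =>
    simp only [pvInnerA, ih, List.mem_cons]
    by_cases h : o = mode
    · simp [h]
    · have h' : ¬ mode = o := fun e => h e.symm
      simp [h, h']

lemma merge_obs_mode_char (p : String) (ms : List String) :
    merge_obs_mode p ms =
      if "priority_stellar_event" ∈ p :: ms then "priority_stellar_event"
      else if "priority_long_event" ∈ p :: ms then "priority_long_event"
      else if "regular_long_event" ∈ p :: ms then "regular_long_event"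
      else "No" := by
  simp only [merge_obs_mode, pvLoopA, pvInnerA_eq, List.mem_cons]
  by_cases h0 : p = "priority_stellar_event" <;>
  by_cases h1 : "priority_stellar_event" ∈ ms <;>
  by_cases h2 : p = "priority_long_event" <;>
  by_cases h3 : "priority_long_event" ∈ ms <;>
  by_cases h4 : p = "regular_long_event" <;>
  by_cases h5 : "regular_long_event" ∈ ms <;>
  simp_all [eq_comm]

lemma pvIndexB_char (c : String) :
    PySem.List.index? pvPriorityB c =
      if c = "priority_stellar_event" then some 0
      else if c = "priority_long_event" then some 1
      else if c = "regular_long_event" then some 2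
      else none := by
  by_cases h0 : c = "priority_stellar_event"
  · subst h0; decide
  by_cases h1 : c = "priority_long_event"
  · subst h1; decide
  by_cases h2 : c = "regular_long_event"
  · subst h2; decide
  simp only [h0, h1, h2, if_false]
  rw [PySem.List.index?_eq_none_iff]
  simp [pvPriorityB, h0, h1, h2]

lemma pvFoldlMin3 (t : List Nat) (x : Nat) (hx : x ≤ 2) (ht : ∀ y ∈ t, y ≤ 2) :
    t.foldl min x = if x = 0 ∨ 0 ∈ t then 0 else if x = 1 ∨ 1 ∈ t then 1 else 2 := by
  induction t generalizing x with
  | nil => simp only [List.foldl_nil, List.not_mem_nil, or_false]; split_ifs <;> omega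
  | cons y t ih =>
    have hy : y ≤ 2 := ht y (List.mem_cons_self)
    have ht' : ∀ z ∈ t, z ≤ 2 := fun z hz => ht z (List.mem_cons_of_mem _ hz)
    simp only [List.foldl_cons, ih (min x y) (by omega) ht', List.mem_cons]
    by_cases h0 : (0 : Nat) ∈ t <;> by_cases h1 : (1 : Nat) ∈ t <;>
      simp only [h0, h1, or_true, or_false] <;> split_ifs <;> omega

lemma pvMin3 (l : List Nat) (h : ∀ x ∈ l, x ≤ 2) :
    PySem.List.min? l (fun y => y) =
      if 0 ∈ l then some 0 else if 1 ∈ l then some 1 else if 2 ∈ l then some 2 else none := by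
  cases l with
  | nil => simp [PySem.List.min?_eq_none_iff]
  | cons x t =>
    have hx : x ≤ 2 := h x (List.mem_cons_self)
    have ht : ∀ y ∈ t, y ≤ 2 := fun y hy => h y (List.mem_cons_of_mem _ hy)
    rw [PySem.List.min?_id_cons, pvFoldlMin3 t x hx ht]
    simp only [List.mem_cons]
    have hx' : x = 0 ∨ x = 1 ∨ x = 2 := by omega
    rcases hx' with rfl | rfl | rfl <;>
      by_cases h0 : (0 : Nat) ∈ t <;> by_cases h1 : (1 : Nat) ∈ t <;>
      by_cases h2 : (2 : Nat) ∈ t <;> simp [h0, h1, h2]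

lemma merge_obs_mode_alt_char (p : String) (ms : List String) :
    merge_obs_mode_alt p ms =
      if "priority_stellar_event" ∈ p :: ms then "priority_stellar_event"
      else if "priority_long_event" ∈ p :: ms then "priority_long_event"
      else if "regular_long_event" ∈ p :: ms then "regular_long_event"
      else "No" := by
  have hmem : ∀ (k : Nat) (m : String), (hm : m ∈ pvPriorityB) →
      (PySem.List.index? pvPriorityB m = some k) →
      (k ∈ (p :: ms).filterMap (fun c => PySem.List.index? pvPriorityB c) ↔ m ∈ p :: ms) := by
    intro k m hm hk
    simp only [List.mem_filterMap]
    constructor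
    · rintro ⟨c, hc, hck⟩
      rw [pvIndexB_char] at hck hk
      split_ifs at hck hk <;> simp_all <;> omega
    · intro hmp; exact ⟨m, hmp, hk⟩
  have hle : ∀ x ∈ (p :: ms).filterMap (fun c => PySem.List.index? pvPriorityB c), x ≤ 2 := by
    intro x hx
    simp only [List.mem_filterMap] at hx
    obtain ⟨c, _, hc⟩ := hx
    rw [pvIndexB_char] at hc
    split_ifs at hc <;> simp_all <;> omega
  have h0 := hmem 0 "priority_stellar_event" (by decide) (by decide)
  have h1 := hmem 1 "priority_long_event" (by decide) (by decide)
  have h2 := hmem 2 "regular_long_event" (by decide) (by decide)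
  simp only [merge_obs_mode_alt]
  rw [pvMin3 _ hle]
  simp only [h0, h1, h2]
  by_cases b0 : "priority_stellar_event" ∈ p :: ms <;>
  by_cases b1 : "priority_long_event" ∈ p :: ms <;>
  by_cases b2 : "regular_long_event" ∈ p :: ms <;>
  simp only [b0, b1, b2, if_true, if_false] <;> simp [pvPriorityB]

-- ===== VERDICT (by name: the statement is the Claim_ definition above) =====
theorem merge_obs_mode_spec : Claim_equal_merge_obs_mode := by
  intro p ms _
  unfold Spec_merge_obs_mode
  rw [merge_obs_mode_char, merge_obs_mode_alt_char]
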